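-- pv_equiv track=rewrite | github.com/shastrihm/DemandAwareSkipGraphs | generator.py | two_cluster_demand_dict
-- ===== SOURCE A (Python) =====
-- def init_dict(n):
--     """
--     Initialize blank dictionary with request pairs as keys
--     """
--     D = {(u,v): 0 for u,v in [(a,b) for a in list(range(n)) for b in list(range(n))]}
--     assert(len(D) == n**2)
--     return D
--
-- def two_cluster_demand_dict(n, thresh1, thresh2):
--     """
--     nodes 0 to thresh1 have (u,v) = 1, nodes thresh2 to n have (u,v) = 1,
--     all other pairs 0
--     """
--     assert(thresh1 != thresh2)
--     D = init_dict(n)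
--     for k in D:
--         u,v = k[0],k[1]
--         if u <= thresh1 and v <= thresh1:
--             D[k] = 1
--         elif u >= thresh2 and v >= thresh2:
--             D[k] = 1
--     return D
-- ===== SOURCE B (Python) =====
-- def init_dict(n):
--     """
--     Initialize blank dictionary with request pairs as keys
--     """
--     D = {(u, v): 0 for u in range(n) for v in range(n)}
--     assert(len(D) == n**2)
--     return D
--
-- def two_cluster_demand_dict(n, thresh1, thresh2):
--     """
--     Build the all-zeros pair dict, then write 1 directly into the two
--     cluster blocks instead of scanning and branching on every key.
--     """
--     assert(thresh1 != thresh2)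
--     D = init_dict(n)
--     hi = min(thresh1 + 1, n)
--     for u in range(hi):
--         for v in range(hi):
--             D[(u, v)] = 1
--     lo = max(thresh2, 0)
--     for u in range(lo, n):
--         for v in range(lo, n):
--             D[(u, v)] = 1
--     return D
-- ===== Notes on version B (the rewrite author's own statement) =====
-- stated objective: alternative
-- what changed: Instead of scanning all n^2 keys and testing the two cluster conditions on each, B writes 1 directly into the two cluster blocks by iterating only over the clamped index ranges [0, min(thresh1+1,n)) and [max(thresh2,0), n).
import Mathlib
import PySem

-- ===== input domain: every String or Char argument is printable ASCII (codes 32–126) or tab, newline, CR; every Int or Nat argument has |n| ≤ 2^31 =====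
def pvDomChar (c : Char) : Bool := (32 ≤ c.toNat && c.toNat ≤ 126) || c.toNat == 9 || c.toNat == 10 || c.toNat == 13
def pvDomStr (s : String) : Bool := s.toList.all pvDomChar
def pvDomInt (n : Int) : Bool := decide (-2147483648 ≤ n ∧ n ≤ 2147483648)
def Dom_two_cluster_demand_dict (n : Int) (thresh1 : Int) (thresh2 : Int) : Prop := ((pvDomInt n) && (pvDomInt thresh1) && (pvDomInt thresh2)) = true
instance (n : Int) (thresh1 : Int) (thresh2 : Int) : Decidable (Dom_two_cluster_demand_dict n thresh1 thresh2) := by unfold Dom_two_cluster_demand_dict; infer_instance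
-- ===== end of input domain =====

-- B replaces A's scan over all n^2 keys (branching on each) by direct writes of 1
-- into the two clamped cluster blocks; same dict, different decomposition (objective: alternative).

-- ===== PORT A =====
-- shared helper: Python init_dict(n) = {(u,v): 0 for u,v in [(a,b) for a in range(n) for b in range(n)]}
-- (the assert len(D) == n**2 raises exactly when n < 0; excluded by Pre_)
def pvPairs (n : Int) : List (Int × Int) :=
  (PySem.List.pyRange 0 n 1).flatMap (fun a => (PySem.List.pyRange 0 n 1).map (fun b => (a, b)))

def pvInitDict (n : Int) : PySem.Dict (Int × Int) Int :=
  (pvPairs n).foldl (fun d k => d.insert k 0) PySem.Dict.empty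

def two_cluster_demand_dict (n : Int) (thresh1 : Int) (thresh2 : Int) : List (Int × Int × Int) :=
  -- assert(thresh1 != thresh2): raises iff thresh1 = thresh2; excluded by Pre_
  let D := pvInitDict n
  let D' := D.keys.foldl (fun d k =>
      if k.1 ≤ thresh1 ∧ k.2 ≤ thresh1 then d.insert k 1
      else if k.1 ≥ thresh2 ∧ k.2 ≥ thresh2 then d.insert k 1
      else d) D
  -- returned dict rendered as a flat (u, v, value) list per the type convention
  D'.items.map (fun e => (e.1.1, e.1.2, e.2))

-- ===== PORT B =====
def two_cluster_demand_dict_alt (n : Int) (thresh1 : Int) (thresh2 : Int) : List (Int × Int × Int) :=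
  -- assert(thresh1 != thresh2): raises iff thresh1 = thresh2; excluded by Pre_
  let D0 := pvInitDict n
  let hi := min (thresh1 + 1) n
  let D1 := (PySem.List.pyRange 0 hi 1).foldl (fun d u =>
      (PySem.List.pyRange 0 hi 1).foldl (fun d v => d.insert (u, v) 1) d) D0
  let lo := max thresh2 0
  let D2 := (PySem.List.pyRange lo n 1).foldl (fun d u =>
      (PySem.List.pyRange lo n 1).foldl (fun d v => d.insert (u, v) 1) d) D1
  D2.items.map (fun e => (e.1.1, e.1.2, e.2))

-- ===== PRECONDITION & SPEC =====
-- Pre_ excludes exactly the inputs on which Python A raises AssertionError: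
-- thresh1 == thresh2 (explicit assert) and n < 0 (init_dict's len(D) == n**2 fails).
def Pre_two_cluster_demand_dict (n : Int) (thresh1 : Int) (thresh2 : Int) : Prop :=
  thresh1 ≠ thresh2 ∧ 0 ≤ n
instance (n : Int) (thresh1 : Int) (thresh2 : Int) : Decidable (Pre_two_cluster_demand_dict n thresh1 thresh2) := by unfold Pre_two_cluster_demand_dict; infer_instance

def pvWitness_two_cluster_demand_dict : Int × Int × Int := (3, 0, 2)

def Spec_two_cluster_demand_dict (n : Int) (thresh1 : Int) (thresh2 : Int) (out : List (Int × Int × Int)) : Prop := out = two_cluster_demand_dict_alt n thresh1 thresh2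
instance (n : Int) (thresh1 : Int) (thresh2 : Int) (out : List (Int × Int × Int)) : Decidable (Spec_two_cluster_demand_dict n thresh1 thresh2 out) := by unfold Spec_two_cluster_demand_dict; infer_instance

-- ===== CLAIM (what is proved, stated in full; the proofs are below) =====
def Claim_equal_two_cluster_demand_dict : Prop := ∀ (n : Int) (thresh1 : Int) (thresh2 : Int), Dom_two_cluster_demand_dict n thresh1 thresh2 → Pre_two_cluster_demand_dict n thresh1 thresh2 → Spec_two_cluster_demand_dict n thresh1 thresh2 (two_cluster_demand_dict n thresh1 thresh2)

-- ===== LEMMAS AND PROOFS =====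

lemma pvPairs_eq_product (n : Int) :
    pvPairs n = (PySem.List.pyRange 0 n 1) ×ˢ (PySem.List.pyRange 0 n 1) := rfl

lemma pvPairs_nodup (n : Int) : (pvPairs n).Nodup := by
  rw [pvPairs_eq_product]
  exact List.Nodup.product (PySem.List.nodup_pyRange_one 0 n) (PySem.List.nodup_pyRange_one 0 n)

lemma mem_pvPairs (n : Int) (p : Int × Int) :
    p ∈ pvPairs n ↔ (0 ≤ p.1 ∧ p.1 < n) ∧ (0 ≤ p.2 ∧ p.2 < n) := by
  obtain ⟨a, b⟩ := p
  rw [pvPairs_eq_product, List.mem_product, PySem.List.mem_pyRange_one, PySem.List.mem_pyRange_one]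

lemma pvInitDict_items (n : Int) :
    (pvInitDict n).items = (pvPairs n).map (fun k => (k, (0 : Int))) := by
  have h := PySem.Dict.items_foldl_insert_fresh (l := pvPairs n) (k := id)
      (v := fun _ => (0 : Int)) (d := (PySem.Dict.empty : PySem.Dict (Int × Int) Int))
      (by intro a _; simp [PySem.Dict.contains_empty])
      (by simpa using pvPairs_nodup n)
  simpa [pvInitDict, PySem.Dict.empty] using h

lemma pvInitDict_keys (n : Int) : (pvInitDict n).keys = pvPairs n := by
  simp [PySem.Dict.keys, pvInitDict_items, List.map_map, Function.comp_def]

lemma pvInitDict_contains (n : Int) (k : Int × Int) (hk : k ∈ pvPairs n) :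
    (pvInitDict n).contains k = true := by
  rw [PySem.Dict.contains_iff_mem_keys, pvInitDict_keys]; exact hk

-- a fold of conditional overwrites at existing keys rewrites the items list pointwise
lemma foldl_if_insert_items (g : (Int × Int) → Bool) :
    ∀ (ks : List (Int × Int)) (d : PySem.Dict (Int × Int) Int),
      (∀ k ∈ ks, d.contains k = true) →
      (ks.foldl (fun d k => if g k then d.insert k 1 else d) d).items
        = d.items.map (fun p => if p.1 ∈ ks ∧ g p.1 then (p.1, (1 : Int)) else p) := by
  intro ks
  induction ks with
  | nil => intro d _; simp
  | cons k0 ks ih =>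
    intro d hd
    simp only [List.foldl_cons]
    by_cases hg : g k0 = true
    · rw [if_pos hg]
      rw [ih (d.insert k0 1) (by
        intro k hk
        rw [PySem.Dict.contains_insert]
        simp [hd k (List.mem_cons_of_mem _ hk)])]
      rw [PySem.Dict.items_insert_of_contains _ _ (hd k0 List.mem_cons_self)]
      rw [List.map_map]
      apply List.map_congr_left
      intro p _
      simp only [Function.comp]
      by_cases hpk : p.1 = k0
      · simp [hpk, hg]
      · simp only [beq_iff_eq, hpk, List.mem_cons]
        have : (p.1 = k0 ∨ p.1 ∈ ks) ∧ g p.1 = true ↔ p.1 ∈ ks ∧ g p.1 = true := by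
          constructor
          · rintro ⟨h1 | h1, h2⟩
            · exact absurd h1 hpk
            · exact ⟨h1, h2⟩
          · rintro ⟨h1, h2⟩; exact ⟨Or.inr h1, h2⟩
        split_ifs with h1 h2 h2 <;> simp_all
    · rw [if_neg hg]
      rw [ih d (fun k hk => hd k (List.mem_cons_of_mem _ hk))]
      apply List.map_congr_left
      intro p _
      by_cases hpk : p.1 = k0
      · have : g p.1 = false := by rw [hpk]; simpa using hg
        simp [this]
      · simp only [List.mem_cons]
        split_ifs with h1 h2 h2 <;> simp_all

lemma foldl_insert_items (ks : List (Int × Int)) (d : PySem.Dict (Int × Int) Int)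
    (h : ∀ k ∈ ks, d.contains k = true) :
    (ks.foldl (fun d k => d.insert k 1) d).items
      = d.items.map (fun p => if p.1 ∈ ks then (p.1, (1 : Int)) else p) := by
  have h' := foldl_if_insert_items (fun _ => true) ks d h
  simpa using h'

lemma nested_fold_eq_product_fold (us vs : List Int) (d : PySem.Dict (Int × Int) Int) :
    us.foldl (fun d u => vs.foldl (fun d v => d.insert (u, v) 1) d) d
      = (us ×ˢ vs).foldl (fun d k => d.insert k 1) d := by
  rw [show us ×ˢ vs = us.flatMap (fun a => vs.map (fun b => (a, b))) from rfl,
    List.foldl_flatMap]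
  simp only [List.foldl_map]

lemma portA_items (n thresh1 thresh2 : Int) :
    ((pvInitDict n).keys.foldl (fun d k =>
        if k.1 ≤ thresh1 ∧ k.2 ≤ thresh1 then d.insert k 1
        else if k.1 ≥ thresh2 ∧ k.2 ≥ thresh2 then d.insert k 1
        else d) (pvInitDict n)).items
      = (pvPairs n).map (fun k =>
          if (k.1 ≤ thresh1 ∧ k.2 ≤ thresh1) ∨ (k.1 ≥ thresh2 ∧ k.2 ≥ thresh2)
          then (k, (1 : Int)) else (k, 0)) := by
  have hbody : (fun (d : PySem.Dict (Int × Int) Int) (k : Int × Int) =>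
        if k.1 ≤ thresh1 ∧ k.2 ≤ thresh1 then d.insert k 1
        else if k.1 ≥ thresh2 ∧ k.2 ≥ thresh2 then d.insert k 1
        else d)
      = (fun d k =>
        if (fun k : Int × Int => decide ((k.1 ≤ thresh1 ∧ k.2 ≤ thresh1) ∨ (k.1 ≥ thresh2 ∧ k.2 ≥ thresh2))) k
        then d.insert k 1 else d) := by
    funext d k
    simp only [decide_eq_true_eq]
    split_ifs <;> tauto
  rw [hbody, pvInitDict_keys,
    foldl_if_insert_items _ (pvPairs n) (pvInitDict n) (fun k hk => pvInitDict_contains n k hk),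
    pvInitDict_items, List.map_map]
  apply List.map_congr_left
  intro k hk
  simp only [Function.comp, decide_eq_true_eq]
  split_ifs with h1 h2 h2 <;> simp_all

set_option maxHeartbeats 1000000 in
lemma portB_items (n thresh1 thresh2 : Int) :
    (((PySem.List.pyRange (max thresh2 0) n 1).foldl (fun d u =>
        (PySem.List.pyRange (max thresh2 0) n 1).foldl (fun d v => d.insert (u, v) 1) d)
      ((PySem.List.pyRange 0 (min (thresh1 + 1) n) 1).foldl (fun d u =>
        (PySem.List.pyRange 0 (min (thresh1 + 1) n) 1).foldl (fun d v => d.insert (u, v) 1) d)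
        (pvInitDict n)))).items
      = (pvPairs n).map (fun k =>
          if k ∈ (PySem.List.pyRange (max thresh2 0) n 1) ×ˢ (PySem.List.pyRange (max thresh2 0) n 1)
          then (k, (1 : Int))
          else if k ∈ (PySem.List.pyRange 0 (min (thresh1 + 1) n) 1) ×ˢ (PySem.List.pyRange 0 (min (thresh1 + 1) n) 1)
          then (k, 1) else (k, 0)) := by
  set r1 := PySem.List.pyRange 0 (min (thresh1 + 1) n) 1 with hr1
  set r2 := PySem.List.pyRange (max thresh2 0) n 1 with hr2
  have hsub1 : ∀ k ∈ r1 ×ˢ r1, k ∈ pvPairs n := by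
    intro k hk
    obtain ⟨u, v⟩ := k
    rw [List.mem_product] at hk
    rw [mem_pvPairs]
    simp only [hr1, PySem.List.mem_pyRange_one] at hk
    omega
  have hsub2 : ∀ k ∈ r2 ×ˢ r2, k ∈ pvPairs n := by
    intro k hk
    obtain ⟨u, v⟩ := k
    rw [List.mem_product] at hk
    rw [mem_pvPairs]
    simp only [hr2, PySem.List.mem_pyRange_one] at hk
    omega
  rw [nested_fold_eq_product_fold, nested_fold_eq_product_fold]
  have hkeys : ∀ k ∈ r2 ×ˢ r2,
      (((r1 ×ˢ r1).foldl (fun d k => d.insert k 1) (pvInitDict n))).contains k = true := by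
    intro k hk
    have h2 := PySem.Dict.keys_foldl_insert (l := r1 ×ˢ r1)
      (f := fun _ _ => (1 : Int)) (d := pvInitDict n)
    rw [PySem.Dict.contains_iff_mem_keys]
    have : (((r1 ×ˢ r1).foldl (fun d k => d.insert k 1) (pvInitDict n))).keys
        = PySem.Set.update (pvInitDict n).keys (r1 ×ˢ r1) := h2
    rw [this, PySem.Set.mem_update]
    left
    rw [pvInitDict_keys]
    exact hsub2 k hk
  rw [foldl_insert_items (r2 ×ˢ r2) _ hkeys]
  rw [foldl_insert_items (r1 ×ˢ r1) (pvInitDict n)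
      (fun k hk => pvInitDict_contains n k (hsub1 k hk))]
  rw [pvInitDict_items, List.map_map, List.map_map]
  apply List.map_congr_left
  intro k _
  simp only [Function.comp]
  split_ifs <;> simp_all

-- ===== VERDICT (by name: the statement is the Claim_ definition above) =====
theorem two_cluster_demand_dict_spec : Claim_equal_two_cluster_demand_dict := by
  intro n thresh1 thresh2 _hdom _hpre
  unfold Spec_two_cluster_demand_dict two_cluster_demand_dict two_cluster_demand_dict_alt
  simp only
  rw [portA_items, portB_items, List.map_map, List.map_map]
  apply List.map_congr_left
  intro k hk
  obtain ⟨u, v⟩ := k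
  rw [mem_pvPairs] at hk
  simp only [Function.comp, List.mem_product, PySem.List.mem_pyRange_one]
  split_ifs <;> first | rfl | omega
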